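-- pv_equiv track=rewrite | github.com/shinhanseo/Algorithm | 프로그래머스/1/468370. 중요한 단어를 스포 방지/중요한 단어를 스포 방지.py | solution
-- ===== SOURCE A (Python) =====
-- def solution(message, spoiler_ranges):
--     words = []   # (word, start, end)
--     temp = ""
--
--     # 1. 단어와 각 단어의 시작/끝 인덱스 구하기
--     for idx, ch in enumerate(message + " "):
--         temp += ch
--
--         if ch == " ":
--             word = temp.strip()
--             if word:
--                 start = idx - len(temp) + 1
--                 end = idx - 1
--                 words.append((word, start, end))
--             temp = ""
--
--     # 2. 스포가 아닌 단어 집합 구하기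
--     not_spoiler_message = set()
--
--     # 3. 각 클릭 시점에 완전히 공개되는 스포 단어들을 저장
--     reveal_at = [[] for _ in range(len(spoiler_ranges))]
--
--     for word, start, end in words:
--         overlap_ranges = []
--
--         for i, (s, e) in enumerate(spoiler_ranges):
--             # 단어 [start, end] 와 스포구간 [s, e] 가 겹치면
--             if not (end < s or e < start):
--                 overlap_ranges.append(i)
--
--         if not overlap_ranges:
--             # 스포가 아닌 단어
--             not_spoiler_message.add(word)
--         else:
--             # 이 단어는 마지막으로 겹치는 스포 구간을 클릭해야 완전히 공개됨
--             last_idx = overlap_ranges[-1]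
--             reveal_at[last_idx].append(word)
--
--     # 4. 클릭 순서대로 중요한 단어 세기
--     important_count = 0
--     revealed_spoiler_words = set()
--
--     for group in reveal_at:
--         for word in group:
--             if word in not_spoiler_message:
--                 continue
--             if word in revealed_spoiler_words:
--                 continue
--
--             important_count += 1
--             revealed_spoiler_words.add(word)
--
--     return important_count
-- ===== SOURCE B (Python) =====
-- def solution(message, spoiler_ranges):
--     # One pass with two pointers over the message: classify each word occurrence
--     # as spoilered (overlaps some range) or clean, then count the set difference.
--     n = len(message)
--     spoiled = set()
--     clean = set()
--     i = 0
--     while i < n: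
--         if message[i] == ' ':
--             i += 1
--             continue
--         j = i
--         while j < n and message[j] != ' ':
--             j += 1
--         w = message[i:j].strip()
--         if w:
--             if any(s <= j - 1 and i <= e for (s, e) in spoiler_ranges):
--                 spoiled.add(w)
--             else:
--                 clean.add(w)
--         i = j
--     return len(spoiled - clean)
-- ===== Notes on version B (the rewrite author's own statement) =====
-- stated objective: simpler
-- what changed: B replaces A's four phases (char-by-char word accumulator over enumerate, a per-word overlap index list, reveal_at buckets keyed by the last overlapping range, and an ordered dedup counting pass) with a single two-pointer sweep that classifies each word occurrence into a spoiled or clean set and returns len(spoiled - clean).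
import Mathlib
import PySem

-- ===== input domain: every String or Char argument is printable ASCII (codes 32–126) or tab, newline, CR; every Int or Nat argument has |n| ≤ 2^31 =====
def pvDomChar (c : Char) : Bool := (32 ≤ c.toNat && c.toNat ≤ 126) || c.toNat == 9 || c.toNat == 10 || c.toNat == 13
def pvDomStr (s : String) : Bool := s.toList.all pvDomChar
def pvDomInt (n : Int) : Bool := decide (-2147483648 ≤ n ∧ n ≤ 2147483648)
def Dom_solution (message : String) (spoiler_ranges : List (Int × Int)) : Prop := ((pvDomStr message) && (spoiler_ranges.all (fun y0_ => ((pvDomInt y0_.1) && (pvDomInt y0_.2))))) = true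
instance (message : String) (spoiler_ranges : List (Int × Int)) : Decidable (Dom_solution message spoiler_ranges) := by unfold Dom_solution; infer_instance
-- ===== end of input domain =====

-- B rewrites A's four phases (char-by-char word builder, per-word range scan into
-- reveal_at buckets, then an ordered dedup count) as a single two-pointer sweep that
-- classifies each word occurrence into a spoiled/clean set and returns |spoiled - clean|
-- (objective: simpler; same asymptotic cost).

-- ===== PORT A =====
-- loop body of phase 1 (for idx, ch in enumerate(message + " "))
def aWordStep (st : List (String × Int × Int) × List Char) (p : Int × Char) :
    List (String × Int × Int) × List Char :=
  let temp := st.2 ++ [p.2]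
  if p.2 = ' ' then
    let word := PySem.Chars.strip temp
    if word ≠ [] then (st.1 ++ [(String.ofList word, p.1 - (temp.length : Int) + 1, p.1 - 1)], [])
    else (st.1, [])
  else (st.1, temp)

-- inner loop body: for i, (s, e) in enumerate(spoiler_ranges)
def aOverlapStep (w : String × Int × Int) (acc : List Int) (p : Int × (Int × Int)) : List Int :=
  if !(decide (w.2.2 < p.2.1) || decide (p.2.2 < w.2.1)) then acc ++ [p.1] else acc

-- loop body of phases 2+3 (for word, start, end in words)
def aClassStep (spoiler_ranges : List (Int × Int)) (st : PySem.Set String × List (List String))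
    (w : String × Int × Int) : PySem.Set String × List (List String) :=
  let overlap := (PySem.List.enumerate spoiler_ranges).foldl (aOverlapStep w) []
  if overlap = [] then (PySem.Set.add st.1 w.1, st.2)
  else
    -- overlap_ranges[-1]; overlap ≠ [] in this branch, so pyGet? is some and the default is dead
    let last_idx := (PySem.List.pyGet? overlap (-1)).getD 0
    (st.1, PySem.List.pySetD st.2 last_idx (PySem.List.pyGetD st.2 last_idx [] ++ [w.1]))

-- loop body of phase 4 (for word in group)
def aCountStep (not_spoiler : PySem.Set String) (st : Int × PySem.Set String) (word : String) :
    Int × PySem.Set String :=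
  if PySem.Set.contains not_spoiler word then st
  else if PySem.Set.contains st.2 word then st
  else (st.1 + 1, PySem.Set.add st.2 word)

def solution (message : String) (spoiler_ranges : List (Int × Int)) : Int :=
  let words := ((PySem.List.enumerate (message.toList ++ [' '])).foldl aWordStep ([], [])).1
  let st2 := words.foldl (aClassStep spoiler_ranges)
      (PySem.Set.empty, List.replicate spoiler_ranges.length ([] : List String))
  (st2.2.foldl (fun st group => group.foldl (aCountStep st2.1) st) ((0 : Int), PySem.Set.empty)).1

-- ===== PORT B =====
-- Source B's while-loop: two pointers i (current) and j (end of the current run of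
-- non-space chars); the inner `while` is the takeWhile/dropWhile pair
def bGo (spoiler_ranges : List (Int × Int)) (cs : List Char) (i : Nat)
    (spoiled clean : PySem.Set String) : PySem.Set String × PySem.Set String :=
  match cs with
  | [] => (spoiled, clean)
  | c :: rest =>
    if c = ' ' then bGo spoiler_ranges rest (i + 1) spoiled clean
    else
      let run := c :: rest.takeWhile (fun x => !(x == ' '))
      let j := i + run.length
      let w := PySem.Chars.strip run
      let rest' := rest.dropWhile (fun x => !(x == ' '))
      if w = [] then bGo spoiler_ranges rest' j spoiled clean
      else if spoiler_ranges.any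
          (fun se => decide (se.1 ≤ (j : Int) - 1) && decide ((i : Int) ≤ se.2)) then
        bGo spoiler_ranges rest' j (PySem.Set.add spoiled (String.ofList w)) clean
      else bGo spoiler_ranges rest' j spoiled (PySem.Set.add clean (String.ofList w))
termination_by cs.length
decreasing_by
  · simp
  · exact Nat.lt_succ_of_le (List.length_dropWhile_le _ _)
  · exact Nat.lt_succ_of_le (List.length_dropWhile_le _ _)
  · exact Nat.lt_succ_of_le (List.length_dropWhile_le _ _)

def solution_alt (message : String) (spoiler_ranges : List (Int × Int)) : Int :=
  let st := bGo spoiler_ranges message.toList 0 PySem.Set.empty PySem.Set.empty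
  PySem.Set.len (PySem.Set.diff st.1 st.2)

-- ===== PRECONDITION & SPEC =====
def Spec_solution (message : String) (spoiler_ranges : List (Int × Int)) (out : Int) : Prop := out = solution_alt message spoiler_ranges
instance (message : String) (spoiler_ranges : List (Int × Int)) (out : Int) : Decidable (Spec_solution message spoiler_ranges out) := by unfold Spec_solution; infer_instance

-- ===== CLAIM (what is proved, stated in full; the proofs are below) =====
def Claim_equal_solution : Prop := ∀ (message : String) (spoiler_ranges : List (Int × Int)), Dom_solution message spoiler_ranges → Spec_solution message spoiler_ranges (solution message spoiler_ranges)

-- ===== LEMMAS AND PROOFS =====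

-- the word occurrence (string, start, end) overlaps some spoiler range
def wordOvl (spoiler_ranges : List (Int × Int)) (w : String × Int × Int) : Bool :=
  spoiler_ranges.any (fun se => decide (se.1 ≤ w.2.2) && decide (w.2.1 ≤ se.2))

-- the words of `cs` with their spans (A's phase 1, recursively):
-- pending = chars seen since the last space, i = index of the head of cs
def collect (pending : List Char) (i : Int) : List Char → List (String × Int × Int)
  | [] => []
  | c :: rest =>
    if c = ' ' then
      (let temp := pending ++ [' ']
       let word := PySem.Chars.strip temp
       if word ≠ [] then [(String.ofList word, i - (temp.length : Int) + 1, i - 1)] else [])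
        ++ collect [] (i + 1) rest
    else collect (pending ++ [c]) (i + 1) rest

-- classify every word occurrence into the (spoiled, clean) pair of sets
def applyW (rs : List (Int × Int)) (ws : List (String × Int × Int))
    (sp cl : PySem.Set String) : PySem.Set String × PySem.Set String :=
  ws.foldl (fun st w =>
    if wordOvl rs w then (PySem.Set.add st.1 w.1, st.2) else (st.1, PySem.Set.add st.2 w.1))
    (sp, cl)

def cleanFold (rs : List (Int × Int)) (ws : List (String × Int × Int))
    (cl : PySem.Set String) : PySem.Set String :=
  ws.foldl (fun c w => if wordOvl rs w then c else PySem.Set.add c w.1) cl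

theorem enumerate_cons {α : Type} (c : α) (l : List α) (i : Int) :
    PySem.List.enumerate (c :: l) i = (i, c) :: PySem.List.enumerate l (i + 1) := rfl

theorem enum_snd {α : Type} (l : List α) (i : Int) :
    (PySem.List.enumerate l i).map Prod.snd = l := by
  induction l generalizing i with
  | nil => rfl
  | cons c rest ih => simp [enumerate_cons, ih]

theorem enum_fst_bounds {α : Type} (l : List α) (i : Int) (q : Int × α)
    (hq : q ∈ PySem.List.enumerate l i) : i ≤ q.1 ∧ q.1 < i + l.length := by
  induction l generalizing i with
  | nil => simp [PySem.List.enumerate] at hq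
  | cons c rest ih =>
    rw [enumerate_cons] at hq
    rcases List.mem_cons.mp hq with h | h
    · subst h; simp
    · have := ih (i + 1) h; simp at this ⊢; omega

theorem applyW_cons (rs : List (Int × Int)) (w : String × Int × Int)
    (ws : List (String × Int × Int)) (sp cl : PySem.Set String) :
    applyW rs (w :: ws) sp cl
      = if wordOvl rs w then applyW rs ws (PySem.Set.add sp w.1) cl
        else applyW rs ws sp (PySem.Set.add cl w.1) := by
  by_cases h : wordOvl rs w <;> simp [applyW, h]

theorem cleanFold_cons (rs : List (Int × Int)) (w : String × Int × Int)
    (ws : List (String × Int × Int)) (cl : PySem.Set String) :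
    cleanFold rs (w :: ws) cl
      = cleanFold rs ws (if wordOvl rs w then cl else PySem.Set.add cl w.1) := by
  by_cases h : wordOvl rs w <;> simp [cleanFold, h]

-- A's phase-1 fold computes `collect`
theorem phase1_eq_collect (cs : List Char) (i : Int) (ws : List (String × Int × Int))
    (pending : List Char) :
    ((PySem.List.enumerate cs i).foldl aWordStep (ws, pending)).1 = ws ++ collect pending i cs := by
  induction cs generalizing i ws pending with
  | nil => simp [PySem.List.enumerate, collect]
  | cons c rest ih =>
    rw [enumerate_cons, List.foldl_cons]
    by_cases hc : c = ' '
    · subst hc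
      by_cases hw : PySem.Chars.strip (pending ++ [' ']) ≠ []
      · rw [show aWordStep (ws, pending) (i, ' ')
            = (ws ++ [(String.ofList (PySem.Chars.strip (pending ++ [' '])),
                i - ((pending ++ [' ']).length : Int) + 1, i - 1)], []) by
            simp [aWordStep, hw]]
        rw [ih, collect]
        simp [hw]
      · rw [show aWordStep (ws, pending) (i, ' ') = (ws, []) by simp [aWordStep, hw]]
        rw [ih, collect]
        simp at hw
        simp [hw]
    · rw [show aWordStep (ws, pending) (i, c) = (ws, pending ++ [c]) by simp [aWordStep, hc]]
      rw [ih, collect]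
      simp [hc]

theorem strip_append_space (xs : List Char) :
    PySem.Chars.strip (xs ++ [' ']) = PySem.Chars.strip xs := by
  have hsp : PySem.Chars.isspace ' ' = true := by decide
  have hr : ∀ ys : List Char, PySem.Chars.rstrip (ys ++ [' ']) = PySem.Chars.rstrip ys := by
    intro ys
    simp only [PySem.Chars.rstrip, List.reverse_append, List.reverse_cons, List.reverse_nil,
      List.nil_append, List.singleton_append, List.dropWhile_cons, hsp, if_pos]
  simp only [PySem.Chars.strip, PySem.Chars.lstrip, List.dropWhile_append]
  by_cases h : (List.dropWhile PySem.Chars.isspace xs).isEmpty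
  · rw [if_pos h, List.isEmpty_iff.mp h]
    simp [List.dropWhile_cons, hsp, PySem.Chars.rstrip]
  · rw [if_neg h, hr]

-- strip of a lone space is empty, so a space flushes an empty word
theorem strip_space : PySem.Chars.strip [' '] = [] := by decide

-- collect consumes a run of non-space characters by appending it to pending
theorem collect_run (run : List Char) (h : ∀ x ∈ run, x ≠ ' ') (pending : List Char)
    (i : Int) (tail : List Char) :
    collect pending i (run ++ tail) = collect (pending ++ run) (i + run.length) tail := by
  induction run generalizing pending i with
  | nil => simp
  | cons c rest ih =>
    have hc : c ≠ ' ' := h c (by simp)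
    rw [List.cons_append, collect]
    simp only [hc, if_false]
    rw [ih (fun x hx => h x (by simp [hx])) (pending ++ [c]) (i + 1)]
    simp
    ring_nf

-- at a space, the pending run is flushed as a word
theorem collect_flush (pending : List Char) (i : Int) (t : List Char) :
    collect pending i (' ' :: t)
      = (if PySem.Chars.strip (pending ++ [' ']) ≠ [] then
          [(String.ofList (PySem.Chars.strip (pending ++ [' '])),
            i - ((pending ++ [' ']).length : Int) + 1, i - 1)] else [])
        ++ collect [] i (' ' :: t) := by
  rw [collect, collect]
  simp [strip_space]

-- B's sweep = classifying collect's word list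
theorem bGo_eq_applyW (rs : List (Int × Int)) (n : Nat) (cs : List Char) (hn : cs.length <= n)
    (i : Nat) (sp cl : PySem.Set String) :
    bGo rs cs i sp cl = applyW rs (collect [] (i : Int) (cs ++ [' '])) sp cl := by
  induction n generalizing cs i sp cl with
  | zero =>
    have : cs = [] := List.length_eq_zero_iff.mp (Nat.le_zero.mp hn)
    subst this
    rw [bGo, show (([] : List Char) ++ [' ']) = [' '] from rfl]
    simp [collect, strip_space, applyW]
  | succ m ih =>
    match cs with
    | [] =>
      rw [bGo, show (([] : List Char) ++ [' ']) = [' '] from rfl]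
      simp [collect, strip_space, applyW]
    | c :: rest =>
      by_cases hc : c = ' '
      · subst hc
        rw [bGo]
        simp only [if_pos rfl]
        rw [ih rest (by simp at hn; omega) (i + 1)]
        rw [List.cons_append, collect]
        simp only [if_pos rfl, List.nil_append, strip_space, ne_eq, not_true_eq_false,
          List.nil_append]
        have : ((i + 1 : Nat) : Int) = (i : Int) + 1 := by push_cast; ring
        rw [this]
        simp [strip_space]
      · have hrun : ∀ x ∈ c :: rest.takeWhile (fun x => !(x == ' ')), x ≠ ' ' := by
          intro x hx
          rcases List.mem_cons.mp hx with h | h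
          · subst h; exact hc
          · have := List.mem_takeWhile_imp h
            simpa using this
        have hsplit : (c :: rest) ++ [' ']
            = (c :: rest.takeWhile (fun x => !(x == ' ')))
              ++ (rest.dropWhile (fun x => !(x == ' ')) ++ [' ']) := by
          conv_lhs => rw [show rest = rest.takeWhile (fun x => !(x == ' '))
            ++ rest.dropWhile (fun x => !(x == ' ')) from
              (List.takeWhile_append_dropWhile).symm]
          simp only [List.cons_append, List.append_assoc]
        obtain ⟨t, ht⟩ : ∃ t, rest.dropWhile (fun x => !(x == ' ')) ++ [' '] = ' ' :: t := by
          cases hdw : rest.dropWhile (fun x => !(x == ' ')) with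
          | nil => exact ⟨[], rfl⟩
          | cons d t' =>
            have hne : rest.dropWhile (fun x => !(x == ' ')) ≠ [] := by rw [hdw]; simp
            have hhead := List.head_dropWhile_not (fun x => !(x == ' ')) hne
            have hdhead : (rest.dropWhile (fun x => !(x == ' '))).head hne = d := by
              simp only [hdw, List.head_cons]
            rw [hdhead] at hhead
            simp only [Bool.not_eq_false', beq_iff_eq] at hhead
            subst hhead
            exact ⟨t' ++ [' '], by simp⟩
        rw [hsplit, collect_run _ hrun [] (i : Int), List.nil_append, ht, collect_flush, ← ht]
        rw [bGo]
        simp only [if_neg hc]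
        have hj : ((i + (c :: rest.takeWhile (fun x => !(x == ' '))).length : Nat) : Int)
            = (i : Int) + ((c :: rest.takeWhile (fun x => !(x == ' '))).length : Int) := by
          push_cast; ring
        have hlen' : (rest.dropWhile (fun x => !(x == ' '))).length ≤ m := by
          have h1 := List.length_dropWhile_le (fun x => !(x == ' ')) rest
          simp at hn; omega
        have hIH := fun sp' cl' => ih (rest.dropWhile (fun x => !(x == ' ')))
          hlen' (i + (c :: rest.takeWhile (fun x => !(x == ' '))).length) sp' cl'
        rw [hj] at hIH
        have hstrip := strip_append_space (c :: rest.takeWhile (fun x => !(x == ' ')))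
        by_cases hw : PySem.Chars.strip (c :: rest.takeWhile (fun x => !(x == ' '))) = []
        · rw [if_pos hw, hIH sp cl]
          rw [show (if PySem.Chars.strip ((c :: rest.takeWhile (fun x => !(x == ' '))) ++ [' ']) ≠ [] then
              [(String.ofList (PySem.Chars.strip ((c :: rest.takeWhile (fun x => !(x == ' '))) ++ [' '])),
                (i : Int) + ((c :: rest.takeWhile (fun x => !(x == ' '))).length : Int)
                  - (((c :: rest.takeWhile (fun x => !(x == ' '))) ++ [' ']).length : Int) + 1,
                (i : Int) + ((c :: rest.takeWhile (fun x => !(x == ' '))).length : Int) - 1)]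
            else []) = ([] : List (String × Int × Int)) from by
              rw [hstrip, hw]; simp]
          rw [List.nil_append]
        · rw [if_neg hw]
          rw [show (if PySem.Chars.strip ((c :: rest.takeWhile (fun x => !(x == ' '))) ++ [' ']) ≠ [] then
              [(String.ofList (PySem.Chars.strip ((c :: rest.takeWhile (fun x => !(x == ' '))) ++ [' '])),
                (i : Int) + ((c :: rest.takeWhile (fun x => !(x == ' '))).length : Int)
                  - (((c :: rest.takeWhile (fun x => !(x == ' '))) ++ [' ']).length : Int) + 1,
                (i : Int) + ((c :: rest.takeWhile (fun x => !(x == ' '))).length : Int) - 1)]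
            else [])
            = [(String.ofList (PySem.Chars.strip (c :: rest.takeWhile (fun x => !(x == ' ')))),
                (i : Int),
                (i : Int) + ((c :: rest.takeWhile (fun x => !(x == ' '))).length : Int) - 1)] from by
              rw [if_pos (by rw [hstrip]; exact hw), hstrip]
              congr 1
              congr 1
              simp
              ring]
          rw [List.singleton_append, applyW_cons]
          have hcond : wordOvl rs
              (String.ofList (PySem.Chars.strip (c :: rest.takeWhile (fun x => !(x == ' ')))),
                (i : Int),
                (i : Int) + ((c :: rest.takeWhile (fun x => !(x == ' '))).length : Int) - 1)
              = rs.any (fun se =>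
                  decide (se.1 ≤ ((i + (c :: rest.takeWhile (fun x => !(x == ' '))).length : Nat) : Int) - 1)
                    && decide ((i : Int) ≤ se.2)) := by
            rw [wordOvl]
            have : (fun se : Int × Int =>
                decide (se.1 ≤ ((i + (c :: rest.takeWhile (fun x => !(x == ' '))).length : Nat) : Int) - 1)
                  && decide ((i : Int) ≤ se.2))
              = (fun se : Int × Int =>
                decide (se.1 ≤ (i : Int) + ((c :: rest.takeWhile (fun x => !(x == ' '))).length : Int) - 1)
                  && decide ((i : Int) ≤ se.2)) := by
              funext se
              rw [hj]
            rw [this]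
          rw [hcond]
          by_cases hov : rs.any (fun se =>
              decide (se.1 ≤ ((i + (c :: rest.takeWhile (fun x => !(x == ' '))).length : Nat) : Int) - 1)
                && decide ((i : Int) ≤ se.2)) = true
          · rw [if_pos hov, if_pos hov, hIH]
          · rw [if_neg hov, if_neg hov, hIH]

-- A's per-word overlap scan, as a filter
theorem overlap_list_eq (rs : List (Int × Int)) (w : String × Int × Int) :
    (PySem.List.enumerate rs).foldl (aOverlapStep w) []
      = ((PySem.List.enumerate rs).filter
          (fun p => !(decide (w.2.2 < p.2.1) || decide (p.2.2 < w.2.1)))).map Prod.fst := by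
  have hfun : aOverlapStep w = fun (acc : List Int) (x : Int × (Int × Int)) =>
      if (!(decide (w.2.2 < x.2.1) || decide (x.2.2 < w.2.1))) = true then acc ++ [x.1]
      else acc := by
    funext acc x
    simp [aOverlapStep]
  rw [hfun, PySem.List.foldl_append_if]
  simp

theorem overlap_empty_iff (rs : List (Int × Int)) (w : String × Int × Int) :
    ((PySem.List.enumerate rs).foldl (aOverlapStep w) [] = []) ↔ wordOvl rs w = false := by
  rw [overlap_list_eq]
  simp only [List.map_eq_nil_iff, List.filter_eq_nil_iff]
  constructor
  · intro h
    rw [wordOvl, List.any_eq_false]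
    intro se hse
    obtain ⟨q, hq, hq2⟩ : ∃ q ∈ PySem.List.enumerate rs 0, q.2 = se := by
      have hm := enum_snd rs 0
      rcases List.mem_map.mp (hm ▸ hse) with ⟨q, hq, hq2⟩
      exact ⟨q, hq, hq2⟩
    subst hq2
    have := h q hq
    simp at this ⊢
    omega
  · intro h q hq
    rw [wordOvl, List.any_eq_false] at h
    have hmem : q.2 ∈ rs := by
      have hm := enum_snd rs 0
      rw [← hm]
      exact List.mem_map.mpr ⟨q, hq, rfl⟩
    have := h q.2 hmem
    simp at this ⊢
    omega

theorem pyGet_neg_one_mem {α : Type} (l : List α) (d : α) (h : l ≠ []) :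
    (PySem.List.pyGet? l (-1)).getD d ∈ l := by
  have hn : 0 < l.length := List.length_pos_iff.mpr h
  have hidx : PySem.List.pyIdx? l.length (-1) = some (l.length - 1) := by
    simp [PySem.List.pyIdx?]
    omega
  rw [PySem.List.pyGet?, hidx]
  simp only [Option.bind_some]
  rw [List.getElem?_eq_getElem (by omega)]
  simp only [Option.getD_some]
  exact List.getElem_mem _

theorem last_idx_bounds (rs : List (Int × Int)) (w : String × Int × Int)
    (h : (PySem.List.enumerate rs).foldl (aOverlapStep w) [] ≠ []) :
    0 ≤ ((PySem.List.pyGet? ((PySem.List.enumerate rs).foldl (aOverlapStep w) []) (-1)).getD 0)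
    ∧ ((PySem.List.pyGet? ((PySem.List.enumerate rs).foldl (aOverlapStep w) []) (-1)).getD 0)
        < (rs.length : Int) := by
  rw [overlap_list_eq] at h ⊢
  have hmem := pyGet_neg_one_mem _ (0 : Int) h
  rcases List.mem_map.mp hmem with ⟨q, hq, hq1⟩
  have := enum_fst_bounds rs 0 q (List.mem_filter.mp hq).1
  omega

theorem mem_flatten_pySetD (ra : List (List String)) (k : Int) (h0 : 0 ≤ k)
    (h1 : k < (ra.length : Int)) (x w : String) :
    x ∈ (PySem.List.pySetD ra k (PySem.List.pyGetD ra k [] ++ [w])).flatten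
      ↔ x ∈ ra.flatten ∨ x = w := by
  have hk : k.toNat < ra.length := by omega
  rw [PySem.List.pySetD_of_nonneg _ _ h0, PySem.List.pyGetD_eq_getElem _ _ h0 h1]
  rw [List.set_eq_take_cons_drop _ hk]
  conv_rhs => rw [show ra = ra.take k.toNat ++ ra[k.toNat] :: ra.drop (k.toNat + 1) by
    rw [List.getElem_cons_drop, List.take_append_drop]]
  simp only [List.flatten_append, List.flatten_cons, List.mem_append, List.mem_singleton]
  tauto

-- A's classification fold: the not_spoiler set is cleanFold
theorem classStep_fst (rs : List (Int × Int)) (ws : List (String × Int × Int))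
    (st : PySem.Set String × List (List String)) :
    (ws.foldl (aClassStep rs) st).1 = cleanFold rs ws st.1 := by
  induction ws generalizing st with
  | nil => rfl
  | cons w rest ih =>
    rw [List.foldl_cons, ih, cleanFold_cons]
    by_cases h : wordOvl rs w = true
    · have hne : ¬ ((PySem.List.enumerate rs).foldl (aOverlapStep w) [] = []) := by
        rw [overlap_empty_iff]; simp [h]
      have : (aClassStep rs st w).1 = st.1 := by simp [aClassStep, hne]
      rw [this, if_pos h]
    · have heq : (PySem.List.enumerate rs).foldl (aOverlapStep w) [] = [] := by
        rw [overlap_empty_iff]; simpa using h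
      have : (aClassStep rs st w).1 = PySem.Set.add st.1 w.1 := by simp [aClassStep, heq]
      rw [this, if_neg h]

-- A's classification fold: bucket-list length preserved, flatten membership
theorem classStep_snd (rs : List (Int × Int)) (ws : List (String × Int × Int))
    (st : PySem.Set String × List (List String)) (hlen : st.2.length = rs.length) :
    (ws.foldl (aClassStep rs) st).2.length = rs.length
    ∧ ∀ x, (x ∈ (ws.foldl (aClassStep rs) st).2.flatten
        ↔ x ∈ st.2.flatten ∨ ∃ w ∈ ws, w.1 = x ∧ wordOvl rs w = true) := by
  induction ws generalizing st with
  | nil => simpa using hlen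
  | cons w rest ih =>
    rw [List.foldl_cons]
    by_cases h : wordOvl rs w = true
    · have hne : ¬ ((PySem.List.enumerate rs).foldl (aOverlapStep w) [] = []) := by
        rw [overlap_empty_iff]; simp [h]
      have hb := last_idx_bounds rs w hne
      have hstep : (aClassStep rs st w).2
          = PySem.List.pySetD st.2 ((PySem.List.pyGet? ((PySem.List.enumerate rs).foldl (aOverlapStep w) []) (-1)).getD 0)
              (PySem.List.pyGetD st.2 ((PySem.List.pyGet? ((PySem.List.enumerate rs).foldl (aOverlapStep w) []) (-1)).getD 0) [] ++ [w.1]) := by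
        simp [aClassStep, hne]
      have hlen' : (aClassStep rs st w).2.length = rs.length := by
        rw [hstep, PySem.List.length_pySetD, hlen]
      rcases ih (aClassStep rs st w) hlen' with ⟨h1, h2⟩
      refine ⟨h1, fun x => ?_⟩
      rw [h2 x, hstep, mem_flatten_pySetD st.2 _ hb.1 (by rw [hlen]; exact hb.2)]
      constructor
      · rintro ((hx | hx) | hx)
        · exact Or.inl hx
        · exact Or.inr ⟨w, by simp, hx.symm, h⟩
        · rcases hx with ⟨w', hw', hx⟩; exact Or.inr ⟨w', by simp [hw'], hx⟩
      · rintro (hx | ⟨w', hw', hx1, hx2⟩)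
        · exact Or.inl (Or.inl hx)
        · rcases List.mem_cons.mp hw' with h' | h'
          · subst h'; exact Or.inl (Or.inr hx1.symm)
          · exact Or.inr ⟨w', h', hx1, hx2⟩
    · have heq : (PySem.List.enumerate rs).foldl (aOverlapStep w) [] = [] := by
        rw [overlap_empty_iff]; simpa using h
      have hstep : (aClassStep rs st w).2 = st.2 := by simp [aClassStep, heq]
      have hlen' : (aClassStep rs st w).2.length = rs.length := by rw [hstep, hlen]
      rcases ih (aClassStep rs st w) hlen' with ⟨h1, h2⟩
      refine ⟨h1, fun x => ?_⟩
      rw [h2 x, hstep]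
      constructor
      · rintro (hx | ⟨w', hw', hx⟩)
        · exact Or.inl hx
        · exact Or.inr ⟨w', by simp [hw'], hx⟩
      · rintro (hx | ⟨w', hw', hx1, hx2⟩)
        · exact Or.inl hx
        · rcases List.mem_cons.mp hw' with h' | h'
          · subst h'; rw [hx2] at h; simp at h
          · exact Or.inr ⟨w', h', hx1, hx2⟩

theorem applyW_snd (rs : List (Int × Int)) (ws : List (String × Int × Int))
    (sp cl : PySem.Set String) : (applyW rs ws sp cl).2 = cleanFold rs ws cl := by
  induction ws generalizing sp cl with
  | nil => rfl
  | cons w rest ih =>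
    rw [applyW_cons, cleanFold_cons]
    by_cases h : wordOvl rs w = true
    · rw [if_pos h, if_pos h, ih]
    · rw [if_neg (by simp [h]), if_neg (by simp [h]), ih]

theorem applyW_fst_mem (rs : List (Int × Int)) (ws : List (String × Int × Int))
    (sp cl : PySem.Set String) (x : String) :
    x ∈ (applyW rs ws sp cl).1 ↔ x ∈ sp ∨ ∃ w ∈ ws, w.1 = x ∧ wordOvl rs w = true := by
  induction ws generalizing sp cl with
  | nil => simp [applyW]
  | cons w rest ih =>
    rw [applyW_cons]
    by_cases h : wordOvl rs w = true
    · rw [if_pos h, ih, PySem.Set.mem_add]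
      constructor
      · rintro ((hx | hx) | hx)
        · exact Or.inl hx
        · exact Or.inr ⟨w, by simp, hx.symm, h⟩
        · rcases hx with ⟨w', hw', hx⟩; exact Or.inr ⟨w', by simp [hw'], hx⟩
      · rintro (hx | ⟨w', hw', hx1, hx2⟩)
        · exact Or.inl (Or.inl hx)
        · rcases List.mem_cons.mp hw' with h' | h'
          · subst h'; exact Or.inl (Or.inr hx1.symm)
          · exact Or.inr ⟨w', h', hx1, hx2⟩
    · rw [if_neg (by simpa using h), ih]
      constructor
      · rintro (hx | ⟨w', hw', hx⟩)
        · exact Or.inl hx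
        · exact Or.inr ⟨w', by simp [hw'], hx⟩
      · rintro (hx | ⟨w', hw', hx1, hx2⟩)
        · exact Or.inl hx
        · rcases List.mem_cons.mp hw' with h' | h'
          · subst h'; rw [hx2] at h; simp at h
          · exact Or.inr ⟨w', h', hx1, hx2⟩

theorem applyW_fst_nodup (rs : List (Int × Int)) (ws : List (String × Int × Int))
    (sp cl : PySem.Set String) (hsp : sp.Nodup) : (applyW rs ws sp cl).1.Nodup := by
  induction ws generalizing sp cl with
  | nil => exact hsp
  | cons w rest ih =>
    rw [applyW_cons]
    by_cases h : wordOvl rs w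
    · rw [if_pos h]; exact ih _ _ (PySem.Set.nodup_add sp w.1 hsp)
    · rw [if_neg (by simpa using h)]; exact ih _ _ hsp

-- A's phase-4 fold, on the flattened bucket list
theorem count_fold (ns : PySem.Set String) (L : List String) (c : Int) (rev : PySem.Set String) :
    L.foldl (aCountStep ns) (c, rev)
      = (c + (PySem.Set.len (PySem.Set.update rev (L.filter (fun w => !PySem.Set.contains ns w)))
            - PySem.Set.len rev),
         PySem.Set.update rev (L.filter (fun w => !PySem.Set.contains ns w))) := by
  induction L generalizing c rev with
  | nil => simp [PySem.Set.update, PySem.Set.len]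
  | cons w rest ih =>
    rw [List.foldl_cons]
    by_cases h1 : PySem.Set.contains ns w = true
    · have hm1 : w ∈ ns := by simpa [PySem.Set.contains] using h1
      rw [show aCountStep ns (c, rev) w = (c, rev) from by simp [aCountStep, hm1], ih,
        List.filter_cons_of_neg (by simp [hm1])]
    · have hm1 : w ∉ ns := by simpa [PySem.Set.contains] using h1
      by_cases h2 : PySem.Set.contains rev w = true
      · have hm2 : w ∈ rev := by simpa [PySem.Set.contains] using h2
        rw [show aCountStep ns (c, rev) w = (c, rev) from by simp [aCountStep, hm1, hm2], ih,
          List.filter_cons_of_pos (by simp [hm1])]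
        have hupd : PySem.Set.update rev (w :: rest.filter (fun w => !PySem.Set.contains ns w))
            = PySem.Set.update rev (rest.filter (fun w => !PySem.Set.contains ns w)) := by
          rw [PySem.Set.update, List.foldl_cons,
            show PySem.Set.add rev w = rev from by simp [PySem.Set.add, hm2], PySem.Set.update]
        rw [hupd]
      · have hm2 : w ∉ rev := by simpa [PySem.Set.contains] using h2
        rw [show aCountStep ns (c, rev) w = (c + 1, PySem.Set.add rev w) from by
          simp [aCountStep, hm1, hm2], ih,
          List.filter_cons_of_pos (by simp [hm1])]
        have hupd : PySem.Set.update rev (w :: rest.filter (fun w => !PySem.Set.contains ns w))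
            = PySem.Set.update (PySem.Set.add rev w)
                (rest.filter (fun w => !PySem.Set.contains ns w)) := by
          rw [PySem.Set.update, List.foldl_cons, PySem.Set.update]
        rw [hupd]
        have hlen : PySem.Set.len (PySem.Set.add rev w) = PySem.Set.len rev + 1 := by
          rw [show PySem.Set.add rev w = rev ++ [w] from by simp [PySem.Set.add, hm2]]
          simp [PySem.Set.len]
        rw [hlen]
        congr 1
        ring

-- two nodup lists with the same members have the same length
theorem length_eq_of_nodup_mem_iff {l1 l2 : List String} (h1 : l1.Nodup) (h2 : l2.Nodup)
    (h : ∀ x, x ∈ l1 ↔ x ∈ l2) : l1.length = l2.length := by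
  rw [← List.toFinset_card_of_nodup h1, ← List.toFinset_card_of_nodup h2]
  congr 1
  ext x
  simp [h x]

-- ===== VERDICT (by name: the statement is the Claim_ definition above) =====
theorem final_eq (rs : List (Int × Int)) (W : List (String × Int × Int)) (F : List String)
    (hF : ∀ x, x ∈ F ↔ ∃ w ∈ W, w.1 = x ∧ wordOvl rs w = true) :
    (0 : Int) + (PySem.Set.len (PySem.Set.update PySem.Set.empty
        (F.filter (fun w => !PySem.Set.contains (cleanFold rs W PySem.Set.empty) w)))
      - PySem.Set.len (PySem.Set.empty : PySem.Set String))
    = PySem.Set.len (PySem.Set.diff (applyW rs W PySem.Set.empty PySem.Set.empty).1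
        (cleanFold rs W PySem.Set.empty)) := by
  have hupd : PySem.Set.update PySem.Set.empty
      (F.filter (fun w => !PySem.Set.contains (cleanFold rs W PySem.Set.empty) w))
      = PySem.Set.ofList
          (F.filter (fun w => !PySem.Set.contains (cleanFold rs W PySem.Set.empty) w)) := rfl
  rw [hupd]
  have hnodup1 := PySem.Set.nodup_ofList
    (F.filter (fun w => !PySem.Set.contains (cleanFold rs W PySem.Set.empty) w))
  have hnodup2 : ((applyW rs W PySem.Set.empty PySem.Set.empty).1.filter
      (fun x => !PySem.Set.contains (cleanFold rs W PySem.Set.empty) x)).Nodup :=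
    (applyW_fst_nodup rs W PySem.Set.empty PySem.Set.empty List.nodup_nil).filter _
  have hmem : ∀ x, x ∈ PySem.Set.ofList
        (F.filter (fun w => !PySem.Set.contains (cleanFold rs W PySem.Set.empty) w))
      ↔ x ∈ (applyW rs W PySem.Set.empty PySem.Set.empty).1.filter
          (fun x => !PySem.Set.contains (cleanFold rs W PySem.Set.empty) x) := by
    intro x
    rw [PySem.Set.mem_ofList, List.mem_filter, List.mem_filter, hF x,
      applyW_fst_mem rs W PySem.Set.empty PySem.Set.empty x]
    simp [PySem.Set.empty]
  have hlen := length_eq_of_nodup_mem_iff hnodup1 hnodup2 hmem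
  rw [show PySem.Set.diff (applyW rs W PySem.Set.empty PySem.Set.empty).1
        (cleanFold rs W PySem.Set.empty)
      = (applyW rs W PySem.Set.empty PySem.Set.empty).1.filter
          (fun x => !PySem.Set.contains (cleanFold rs W PySem.Set.empty) x) from rfl]
  simp only [PySem.Set.len, hlen]
  simp [PySem.Set.empty]

theorem solution_spec : Claim_equal_solution := by
  unfold Claim_equal_solution
  intro message rs _
  unfold Spec_solution
  rw [solution, solution_alt]
  rw [phase1_eq_collect (message.toList ++ [' ']) 0 [] [], List.nil_append]
  rw [bGo_eq_applyW rs (message.toList.length) message.toList (le_refl _) 0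
    PySem.Set.empty PySem.Set.empty]
  rw [show ((0 : Nat) : Int) = 0 from rfl]
  rw [classStep_fst]
  rw [← List.foldl_flatten, count_fold]
  rw [applyW_snd]
  dsimp only
  exact final_eq rs _ _ (fun x => by
    rw [(classStep_snd rs (collect [] 0 (message.toList ++ [' ']))
      (PySem.Set.empty, List.replicate rs.length []) (by simp)).2 x]
    simp)
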